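-- pv_equiv track=rewrite | github.com/MuggleWei/Hakuna_Matata | play/py/ls_iface_pci/ls_iface_pci.py | parse_pci_slot_result
-- ===== SOURCE A (Python) =====
-- def parse_pci_slot_result(lines):
--     """
--     解析 dmidecode -t slot 输出信息
--     """
--     infos = {}
--     info = {}
--     for line in lines:
--         cur_line = line.strip()
--         if len(cur_line) == 0:
--             bus_info = info.get("Bus Address", None)
--             if bus_info is not None:
--                 infos[bus_info] = info
--             info = {}
--             continue
--         split_pos = cur_line.find(":")
--         if split_pos + 1 < len(cur_line):
--             info[cur_line[:split_pos].strip()] = cur_line[split_pos + 1:].strip()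
--     if len(info.keys()) > 0:
--         bus_info = info.get("Bus Address", None)
--         if bus_info is not None:
--             infos[bus_info] = info
--     return infos
-- ===== SOURCE B (Python) =====
-- def parse_pci_slot_result(lines):
--     # Segment the lines into blocks separated by blank lines, then parse each
--     # block into a dict and keep those carrying a "Bus Address" key.
--     blocks = []
--     cur = []
--     for line in lines:
--         s = line.strip()
--         if len(s) == 0:
--             blocks.append(cur)
--             cur = []
--         else:
--             cur.append(s)
--     blocks.append(cur)
--     infos = {}
--     for block in blocks:
--         info = {}
--         for s in block:
--             p = s.find(":")
--             if p + 1 < len(s):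
--                 info[s[:p].strip()] = s[p + 1:].strip()
--         bus = info.get("Bus Address")
--         if bus is not None:
--             infos[bus] = info
--     return infos
-- ===== Notes on version B (the rewrite author's own statement) =====
-- stated objective: alternative
-- what changed: Replaces A's interleaved single pass with flush-on-blank-line mutable state by a two-phase decomposition: first segment the lines into blocks at blank lines, then parse each block independently and keep those with a 'Bus Address' key.
import Mathlib
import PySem

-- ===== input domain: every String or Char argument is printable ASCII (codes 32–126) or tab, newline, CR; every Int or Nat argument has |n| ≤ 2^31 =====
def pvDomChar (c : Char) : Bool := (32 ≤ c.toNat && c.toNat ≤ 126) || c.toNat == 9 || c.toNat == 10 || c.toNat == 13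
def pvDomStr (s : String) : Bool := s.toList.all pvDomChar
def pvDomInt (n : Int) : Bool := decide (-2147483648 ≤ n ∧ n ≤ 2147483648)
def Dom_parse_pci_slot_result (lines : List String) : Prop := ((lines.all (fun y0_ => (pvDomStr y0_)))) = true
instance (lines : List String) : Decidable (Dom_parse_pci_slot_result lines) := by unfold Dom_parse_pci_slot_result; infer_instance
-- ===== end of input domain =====

-- B replaces A's interleaved flush-on-blank single pass by a segment-into-blocks-then-parse-each-block decomposition (alternative, same cost).

-- ===== PORT A =====
-- A's flush: info.get("Bus Address"); if not None: infos[bus] = info  (at blank lines and at the end)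
def pvFlushA (infos : PySem.Dict String (PySem.Dict String String))
    (info : PySem.Dict String String) : PySem.Dict String (PySem.Dict String String) :=
  match info.get? "Bus Address" with
  | some bus => infos.insert bus info
  | none => infos

-- one iteration of A's 'for line in lines' loop over the state (infos, info)
def pvStepA (st : PySem.Dict String (PySem.Dict String String) × PySem.Dict String String)
    (line : String) : PySem.Dict String (PySem.Dict String String) × PySem.Dict String String :=
  let cur := PySem.Str.strip line
  if PySem.Str.len cur = 0 then
    (pvFlushA st.1 st.2, PySem.Dict.empty)
  else
    let split_pos := PySem.Str.find cur ":"
    if split_pos + 1 < PySem.Str.len cur then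
      (st.1, st.2.insert (PySem.Str.strip (PySem.Str.slice cur none (some split_pos)))
                         (PySem.Str.strip (PySem.Str.slice cur (some (split_pos + 1)) none)))
    else st

def parse_pci_slot_result (lines : List String) : List (String × List (String × String)) :=
  let st := lines.foldl pvStepA (PySem.Dict.empty, PySem.Dict.empty)
  let infos := if 0 < (PySem.Dict.keys st.2).length then pvFlushA st.1 st.2 else st.1
  infos.items.map (fun kv => (kv.1, kv.2.items))

-- ===== PORT B =====
-- phase 1 step: collect stripped non-blank lines into the current block; a blank line closes the block
def pvSplitStep (st : List (List String) × List String) (line : String) :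
    List (List String) × List String :=
  let s := PySem.Str.strip line
  if PySem.Str.len s = 0 then (st.1 ++ [st.2], []) else (st.1, st.2 ++ [s])

-- phase 2: parse one block of stripped lines into a dict
def pvBlockDict (block : List String) : PySem.Dict String String :=
  block.foldl (fun info s =>
    let p := PySem.Str.find s ":"
    if p + 1 < PySem.Str.len s then
      info.insert (PySem.Str.strip (PySem.Str.slice s none (some p)))
                  (PySem.Str.strip (PySem.Str.slice s (some (p + 1)) none))
    else info) PySem.Dict.empty

-- keep the block's dict if it has a "Bus Address" key
def pvProcBlock (infos : PySem.Dict String (PySem.Dict String String)) (block : List String) :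
    PySem.Dict String (PySem.Dict String String) :=
  let info := pvBlockDict block
  match info.get? "Bus Address" with
  | some bus => infos.insert bus info
  | none => infos

def parse_pci_slot_result_alt (lines : List String) : List (String × List (String × String)) :=
  let st := lines.foldl pvSplitStep ([], [])
  let blocks := st.1 ++ [st.2]
  let infos := blocks.foldl pvProcBlock PySem.Dict.empty
  infos.items.map (fun kv => (kv.1, kv.2.items))

-- ===== PRECONDITION & SPEC =====
def Spec_parse_pci_slot_result (lines : List String) (out : List (String × List (String × String))) : Prop := out = parse_pci_slot_result_alt lines
instance (lines : List String) (out : List (String × List (String × String))) : Decidable (Spec_parse_pci_slot_result lines out) := by unfold Spec_parse_pci_slot_result; infer_instance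

-- ===== CLAIM (what is proved, stated in full; the proofs are below) =====
def Claim_equal_parse_pci_slot_result : Prop := ∀ (lines : List String), Dom_parse_pci_slot_result lines → Spec_parse_pci_slot_result lines (parse_pci_slot_result lines)

-- ===== LEMMAS AND PROOFS =====

-- B's phase 1, read recursively (proof-only helper)
def pvSplitBlocks : List String → List String → List (List String)
  | [], cur => [cur]
  | l :: rest, cur =>
      if PySem.Str.len (PySem.Str.strip l) = 0 then cur :: pvSplitBlocks rest []
      else pvSplitBlocks rest (cur ++ [PySem.Str.strip l])

-- recursive readings of the two foldl loops (proof-only; avoid simp/rw unfolding stuck folds)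
def pvLoopA : List String →
    PySem.Dict String (PySem.Dict String String) × PySem.Dict String String →
    PySem.Dict String (PySem.Dict String String) × PySem.Dict String String
  | [], st => st
  | l :: rest, st => pvLoopA rest (pvStepA st l)

def pvProcLoop : List (List String) →
    PySem.Dict String (PySem.Dict String String) → PySem.Dict String (PySem.Dict String String)
  | [], infos => infos
  | b :: bs, infos => pvProcLoop bs (pvProcBlock infos b)

lemma pvSplitBlocks_nil (cur : List String) : pvSplitBlocks [] cur = [cur] := rfl

lemma pvSplitBlocks_cons (l : String) (rest cur : List String) :
    pvSplitBlocks (l :: rest) cur =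
      if PySem.Str.len (PySem.Str.strip l) = 0 then cur :: pvSplitBlocks rest []
      else pvSplitBlocks rest (cur ++ [PySem.Str.strip l]) := rfl

lemma pvLoopA_cons (st : PySem.Dict String (PySem.Dict String String) × PySem.Dict String String)
    (l : String) (rest : List String) : pvLoopA (l :: rest) st = pvLoopA rest (pvStepA st l) := rfl

lemma pvProcLoop_cons (infos : PySem.Dict String (PySem.Dict String String))
    (b : List String) (bs : List (List String)) :
    pvProcLoop (b :: bs) infos = pvProcLoop bs (pvProcBlock infos b) := rfl

lemma pvLoopA_eq_foldl : ∀ (lines : List String)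
    (st : PySem.Dict String (PySem.Dict String String) × PySem.Dict String String),
    pvLoopA lines st = lines.foldl pvStepA st := by
  intro lines
  induction lines with
  | nil => intro st; rfl
  | cons l rest ih =>
      intro st
      rw [List.foldl_cons, pvLoopA_cons]
      exact ih (pvStepA st l)

lemma pvProcLoop_eq_foldl : ∀ (bs : List (List String))
    (infos : PySem.Dict String (PySem.Dict String String)),
    pvProcLoop bs infos = bs.foldl pvProcBlock infos := by
  intro bs
  induction bs with
  | nil => intro infos; rfl
  | cons b rest ih =>
      intro infos
      rw [List.foldl_cons, pvProcLoop_cons]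
      exact ih (pvProcBlock infos b)

lemma pvSplitStep_eq (st : List (List String) × List String) (l : String) :
    pvSplitStep st l =
      if PySem.Str.len (PySem.Str.strip l) = 0 then (st.1 ++ [st.2], [])
      else (st.1, st.2 ++ [PySem.Str.strip l]) := rfl

lemma pvSplitFold_eq : ∀ (lines : List String) (bs : List (List String)) (cur : List String),
    (lines.foldl pvSplitStep (bs, cur)).1 ++ [(lines.foldl pvSplitStep (bs, cur)).2]
      = bs ++ pvSplitBlocks lines cur := by
  intro lines
  induction lines with
  | nil => intro bs cur; rw [List.foldl_nil, pvSplitBlocks_nil]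
  | cons l rest ih =>
      intro bs cur
      rw [List.foldl_cons, pvSplitStep_eq, pvSplitBlocks_cons]
      by_cases h : PySem.Str.len (PySem.Str.strip l) = 0
      · rw [if_pos h, if_pos h, ih]
        simp
      · rw [if_neg h, if_neg h, ih]

lemma pvBlockDict_append (cur : List String) (s : String) :
    pvBlockDict (cur ++ [s]) =
      if PySem.Str.find s ":" + 1 < PySem.Str.len s then
        (pvBlockDict cur).insert
          (PySem.Str.strip (PySem.Str.slice s none (some (PySem.Str.find s ":"))))
          (PySem.Str.strip (PySem.Str.slice s (some (PySem.Str.find s ":" + 1)) none))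
      else pvBlockDict cur := by
  unfold pvBlockDict
  rw [List.foldl_append]
  rfl

lemma pvStepA_pair (a : PySem.Dict String (PySem.Dict String String))
    (b : PySem.Dict String String) (line : String) :
    pvStepA (a, b) line =
      if PySem.Str.len (PySem.Str.strip line) = 0 then (pvFlushA a b, PySem.Dict.empty)
      else
        if PySem.Str.find (PySem.Str.strip line) ":" + 1 < PySem.Str.len (PySem.Str.strip line) then
          (a, b.insert
            (PySem.Str.strip (PySem.Str.slice (PySem.Str.strip line) none (some (PySem.Str.find (PySem.Str.strip line) ":"))))
            (PySem.Str.strip (PySem.Str.slice (PySem.Str.strip line) (some (PySem.Str.find (PySem.Str.strip line) ":" + 1)) none)))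
        else (a, b) := rfl

-- main invariant: A's loop from state (infos, dict-of-cur) plus final flush = B's per-block pass
lemma pvLoop_eq : ∀ (lines : List String) (infos : PySem.Dict String (PySem.Dict String String))
    (cur : List String),
    (if 0 < (PySem.Dict.keys (pvLoopA lines (infos, pvBlockDict cur)).2).length
     then pvFlushA (pvLoopA lines (infos, pvBlockDict cur)).1 (pvLoopA lines (infos, pvBlockDict cur)).2
     else (pvLoopA lines (infos, pvBlockDict cur)).1)
      = pvProcLoop (pvSplitBlocks lines cur) infos := by
  intro lines
  induction lines with
  | nil =>
      intro infos cur
      rw [pvSplitBlocks_nil, pvProcLoop_cons]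
      show (if 0 < (PySem.Dict.keys (pvBlockDict cur)).length
            then pvFlushA infos (pvBlockDict cur) else infos) = pvProcLoop [] (pvProcBlock infos cur)
      by_cases hk : 0 < (PySem.Dict.keys (pvBlockDict cur)).length
      · rw [if_pos hk]; rfl
      · rw [if_neg hk]
        have hit : (pvBlockDict cur).items = [] := by
          simp only [PySem.Dict.keys, List.length_map, Nat.pos_iff_ne_zero, ne_eq,
            Decidable.not_not, List.length_eq_zero_iff] at hk
          exact hk
        have hd : pvBlockDict cur = PySem.Dict.mk [] := by
          apply PySem.Dict.ext; exact hit
        have hp : pvProcBlock infos cur = infos := by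
          unfold pvProcBlock
          rw [hd]
          rfl
        rw [hp]
        rfl
  | cons l rest ih =>
      intro infos cur
      rw [pvLoopA_cons, pvSplitBlocks_cons, pvStepA_pair]
      by_cases h : PySem.Str.len (PySem.Str.strip l) = 0
      · rw [if_pos h, if_pos h, pvProcLoop_cons]
        have h2 : pvProcBlock infos cur = pvFlushA infos (pvBlockDict cur) := rfl
        rw [h2]
        have h3 := ih (pvFlushA infos (pvBlockDict cur)) []
        rw [show (pvBlockDict [] : PySem.Dict String String) = PySem.Dict.empty from rfl] at h3
        exact h3
      · rw [if_neg h, if_neg h]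
        have h1 : (if PySem.Str.find (PySem.Str.strip l) ":" + 1 < PySem.Str.len (PySem.Str.strip l) then
              (infos, (pvBlockDict cur).insert
                (PySem.Str.strip (PySem.Str.slice (PySem.Str.strip l) none (some (PySem.Str.find (PySem.Str.strip l) ":"))))
                (PySem.Str.strip (PySem.Str.slice (PySem.Str.strip l) (some (PySem.Str.find (PySem.Str.strip l) ":" + 1)) none)))
            else (infos, pvBlockDict cur))
            = (infos, pvBlockDict (cur ++ [PySem.Str.strip l])) := by
          rw [pvBlockDict_append]
          by_cases hc : PySem.Str.find (PySem.Str.strip l) ":" + 1 < PySem.Str.len (PySem.Str.strip l)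
          · rw [if_pos hc, if_pos hc]
          · rw [if_neg hc, if_neg hc]
        rw [h1]
        exact ih infos (cur ++ [PySem.Str.strip l])

-- ===== VERDICT (by name: the statement is the Claim_ definition above) =====
theorem parse_pci_slot_result_spec : Claim_equal_parse_pci_slot_result := by
  intro lines _
  unfold Spec_parse_pci_slot_result
  simp only [parse_pci_slot_result, parse_pci_slot_result_alt]
  rw [pvSplitFold_eq lines [] [], List.nil_append,
    ← pvProcLoop_eq_foldl (pvSplitBlocks lines []) PySem.Dict.empty,
    show (PySem.Dict.empty : PySem.Dict String String) = pvBlockDict [] from rfl,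
    ← pvLoopA_eq_foldl lines (PySem.Dict.empty, pvBlockDict []),
    pvLoop_eq lines PySem.Dict.empty []]
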